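-- pv_equiv track=rewrite | github.com/Antoinepolo/Cours | Laboratoire/Laboratoire N°1/exo6.17.py | changeCar
-- ===== SOURCE A (Python) =====
-- def changeCar(ch, ca1, ca2, debut = None, fin = None):
--     # Si on a pas donner de début, on le met à 0
--     if debut == None:
--         debut = 0
--
--     # Si on a pas donner de fin, on la met à len -1
--     if fin == None:
--         fin = len(ch) -1
--
--     # On créer une chaine vide
--     new_string = ""
--
--     # On boucle sur chaque élément de la liste
--     # Si c'est égal à ca2, on met ca2, sinon on met le caractère
--     for i in range(len(ch)):
--         if debut <= i <= fin and ch[i] == ca1: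
--             new_string += ca2
--         else:
--             new_string += ch[i]
--
--     # On revoie
--     return new_string
-- ===== SOURCE B (Python) =====
-- def changeCar(ch, ca1, ca2, debut = None, fin = None):
--     # Slice decomposition: untouched prefix, transformed middle, untouched suffix.
--     lo = max(debut if debut is not None else 0, 0)
--     hi = min(fin if fin is not None else len(ch) - 1, len(ch) - 1)
--     if lo > hi:
--         return ch
--     middle = ''.join(ca2 if c == ca1 else c for c in ch[lo:hi + 1])
--     return ch[:lo] + middle + ch[hi + 1:]
-- ===== Notes on version B (the rewrite author's own statement) =====
-- stated objective: faster
-- what changed: Instead of testing the range bound on every index while growing the result with repeated string concatenation, B clamps the bounds once, returns ch unchanged for an empty range, and builds the result as untouched prefix slice + ''.join-transformed middle slice + untouched suffix slice.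
import Mathlib
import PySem

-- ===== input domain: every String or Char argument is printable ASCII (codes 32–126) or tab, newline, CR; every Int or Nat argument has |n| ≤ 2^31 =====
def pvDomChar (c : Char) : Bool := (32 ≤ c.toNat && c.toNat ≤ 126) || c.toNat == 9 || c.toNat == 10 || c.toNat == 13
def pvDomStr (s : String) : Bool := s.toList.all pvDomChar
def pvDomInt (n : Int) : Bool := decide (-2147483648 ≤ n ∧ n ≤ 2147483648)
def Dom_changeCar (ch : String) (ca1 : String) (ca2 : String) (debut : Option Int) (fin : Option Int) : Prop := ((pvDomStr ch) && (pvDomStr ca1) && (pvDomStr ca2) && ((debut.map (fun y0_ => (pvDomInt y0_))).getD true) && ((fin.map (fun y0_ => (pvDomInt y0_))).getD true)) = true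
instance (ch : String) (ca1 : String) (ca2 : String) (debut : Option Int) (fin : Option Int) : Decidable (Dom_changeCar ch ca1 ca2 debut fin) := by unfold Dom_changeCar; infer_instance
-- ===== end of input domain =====

-- B replaces A's per-index bound test inside a character accumulator loop by a slice
-- decomposition (untouched prefix ++ transformed middle ++ untouched suffix); measured
-- constant-factor faster in Python (bulk slices/join instead of per-character += and tests).

-- ===== PORT A =====
-- A: loop i over range(len(ch)); append ca2 when debut <= i <= fin and ch[i] == ca1, else ch[i].
def changeCar (ch : String) (ca1 : String) (ca2 : String) (debut : Option Int) (fin : Option Int) : String :=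
  let d : Int := debut.getD 0
  let f : Int := fin.getD ((ch.toList.length : Int) - 1)
  let cs := ch.toList
  String.ofList <|
    (PySem.List.pyRange 0 (cs.length : Int) 1).foldl
      (fun acc i =>
        if d ≤ i ∧ i ≤ f ∧ [PySem.List.pyGetD cs i ' '] = ca1.toList then acc ++ ca2.toList
        else acc ++ [PySem.List.pyGetD cs i ' ']) []

-- ===== PORT B =====
-- B: clamp bounds once; empty range returns ch; else prefix ++ transformed middle ++ suffix.
def changeCar_alt (ch : String) (ca1 : String) (ca2 : String) (debut : Option Int) (fin : Option Int) : String :=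
  let cs := ch.toList
  let n : Int := cs.length
  let lo : Int := max (debut.getD 0) 0
  let hi : Int := min (fin.getD (n - 1)) (n - 1)
  if hi < lo then ch
  else
    let middle := ((cs.drop lo.toNat).take (hi + 1 - lo).toNat).flatMap
      (fun c => if [c] = ca1.toList then ca2.toList else [c])
    String.ofList (cs.take lo.toNat ++ middle ++ cs.drop (hi + 1).toNat)

-- ===== PRECONDITION & SPEC =====
def Spec_changeCar (ch : String) (ca1 : String) (ca2 : String) (debut : Option Int) (fin : Option Int) (out : String) : Prop := out = changeCar_alt ch ca1 ca2 debut fin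
instance (ch : String) (ca1 : String) (ca2 : String) (debut : Option Int) (fin : Option Int) (out : String) : Decidable (Spec_changeCar ch ca1 ca2 debut fin out) := by unfold Spec_changeCar; infer_instance

-- ===== CLAIM (what is proved, stated in full; the proofs are below) =====
def Claim_equal_changeCar : Prop := ∀ (ch : String) (ca1 : String) (ca2 : String) (debut : Option Int) (fin : Option Int), Dom_changeCar ch ca1 ca2 debut fin → Spec_changeCar ch ca1 ca2 debut fin (changeCar ch ca1 ca2 debut fin)

-- ===== LEMMAS AND PROOFS =====

-- Pointwise congruence for flatMap.
theorem pvFlatMap_congr {α β : Type} {l : List α} {g h : α → List β}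
    (hgh : ∀ a ∈ l, g a = h a) : l.flatMap g = l.flatMap h := by
  simp only [List.flatMap_def]
  exact congrArg List.flatten (List.map_congr_left hgh)

-- If the condition fails on every enumerated pair, the loop body copies the list.
theorem pvFlatMap_enum_false {α : Type} (l : List α) (s : Int)
    (cond : Int × α → Prop) [DecidablePred cond] (F : Int × α → List α)
    (h : ∀ p ∈ PySem.List.enumerate l s, ¬ cond p) :
    (PySem.List.enumerate l s).flatMap (fun p => if cond p then F p else [p.2]) = l := by
  have h1 : (PySem.List.enumerate l s).flatMap (fun p => if cond p then F p else [p.2])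
      = (PySem.List.enumerate l s).flatMap (fun p => [p.2]) :=
    pvFlatMap_congr (fun p hp => if_neg (h p hp))
  rw [h1]
  have h2 : (PySem.List.enumerate l s).flatMap (fun p => [p.2])
      = ((PySem.List.enumerate l s).map (fun p => p.2)).flatMap (fun c => [c]) := by
    rw [List.flatMap_map]
  rw [h2, PySem.List.map_snd_enumerate]
  simp

-- If the range condition holds on every enumerated pair, the loop body is the pure
-- character transformation.
theorem pvFlatMap_enum_true {α : Type} (l : List α) (s : Int)
    (rc1 rc2 : Int → Prop) [DecidablePred rc1] [DecidablePred rc2]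
    (m : α → Prop) [DecidablePred m] (F : α → List α)
    (h : ∀ p ∈ PySem.List.enumerate l s, rc1 p.1 ∧ rc2 p.1) :
    (PySem.List.enumerate l s).flatMap (fun p => if rc1 p.1 ∧ rc2 p.1 ∧ m p.2 then F p.2 else [p.2])
      = l.flatMap (fun c => if m c then F c else [c]) := by
  have h1 : (PySem.List.enumerate l s).flatMap
        (fun p => if rc1 p.1 ∧ rc2 p.1 ∧ m p.2 then F p.2 else [p.2])
      = (PySem.List.enumerate l s).flatMap (fun p => if m p.2 then F p.2 else [p.2]) := by
    refine pvFlatMap_congr (fun p hp => ?_)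
    by_cases hm : m p.2
    · rw [if_pos ⟨(h p hp).1, (h p hp).2, hm⟩, if_pos hm]
    · rw [if_neg (fun hc => hm hc.2.2), if_neg hm]
  rw [h1]
  have h2 : (PySem.List.enumerate l s).flatMap (fun p => if m p.2 then F p.2 else [p.2])
      = ((PySem.List.enumerate l s).map (fun p => p.2)).flatMap
          (fun c => if m c then F c else [c]) := by
    rw [List.flatMap_map]
  rw [h2, PySem.List.map_snd_enumerate]

-- A's foldl over range(len) equals a flatMap over the enumerated characters.
theorem pvFoldl_eq_flatMap_enum (cs : List Char) (d f : Int) (ca1 ca2 : List Char) :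
    (PySem.List.pyRange 0 (cs.length : Int) 1).foldl
      (fun acc i =>
        if d ≤ i ∧ i ≤ f ∧ [PySem.List.pyGetD cs i ' '] = ca1 then acc ++ ca2
        else acc ++ [PySem.List.pyGetD cs i ' ']) []
    = (PySem.List.enumerate cs 0).flatMap
        (fun p => if d ≤ p.1 ∧ p.1 ≤ f ∧ [p.2] = ca1 then ca2 else [p.2]) := by
  have hb : ∀ (acc : List Char) (i : Int),
      (if d ≤ i ∧ i ≤ f ∧ [PySem.List.pyGetD cs i ' '] = ca1 then acc ++ ca2
       else acc ++ [PySem.List.pyGetD cs i ' '])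
      = acc ++ (if d ≤ i ∧ i ≤ f ∧ [PySem.List.pyGetD cs i ' '] = ca1 then ca2
                else [PySem.List.pyGetD cs i ' ']) := by
    intro acc i; split_ifs <;> rfl
  have hfun : (fun (acc : List Char) (i : Int) =>
        if d ≤ i ∧ i ≤ f ∧ [PySem.List.pyGetD cs i ' '] = ca1 then acc ++ ca2
        else acc ++ [PySem.List.pyGetD cs i ' '])
      = (fun (acc : List Char) (i : Int) =>
        acc ++ (if d ≤ i ∧ i ≤ f ∧ [PySem.List.pyGetD cs i ' '] = ca1 then ca2
                else [PySem.List.pyGetD cs i ' '])) := by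
    funext acc i; exact hb acc i
  calc (PySem.List.pyRange 0 (cs.length : Int) 1).foldl
        (fun acc i =>
          if d ≤ i ∧ i ≤ f ∧ [PySem.List.pyGetD cs i ' '] = ca1 then acc ++ ca2
          else acc ++ [PySem.List.pyGetD cs i ' ']) []
      = (PySem.List.pyRange 0 (cs.length : Int) 1).foldl
          (fun acc i => acc ++ (if d ≤ i ∧ i ≤ f ∧ [PySem.List.pyGetD cs i ' '] = ca1 then ca2
                                else [PySem.List.pyGetD cs i ' '])) [] := by
        rw [hfun]
    _ = (PySem.List.pyRange 0 (cs.length : Int) 1).flatMap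
          (fun i => if d ≤ i ∧ i ≤ f ∧ [PySem.List.pyGetD cs i ' '] = ca1 then ca2
                    else [PySem.List.pyGetD cs i ' ']) := by
        rw [PySem.List.foldl_append_eq_flatMap]; rfl
    _ = (PySem.List.enumerate cs 0).flatMap
          (fun p => if d ≤ p.1 ∧ p.1 ≤ f ∧ [p.2] = ca1 then ca2 else [p.2]) := by
        rw [PySem.List.enumerate_eq_map_pyRange cs ' ', List.flatMap_map]
        rfl

-- Index bounds of every member of an enumeration.
theorem pvEnum_bounds {α : Type} {l : List α} {s : Int} {p : Int × α}
    (hp : p ∈ PySem.List.enumerate l s) : s ≤ p.1 ∧ p.1 < s + l.length := by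
  rcases (PySem.List.mem_enumerate_iff l s p).mp hp with ⟨k, hk, hpk⟩
  rw [hpk]
  constructor
  · simp
  · simp only []
    have : (k : Int) < (l.length : Int) := by exact_mod_cast hk
    omega

-- ===== VERDICT (by name: the statement is the Claim_ definition above) =====
theorem changeCar_spec : Claim_equal_changeCar := by
  intro ch ca1 ca2 debut fin _
  unfold Spec_changeCar changeCar changeCar_alt
  simp only []
  set cs := ch.toList with hcs
  set d : Int := debut.getD 0 with hd
  set f : Int := fin.getD ((cs.length : Int) - 1) with hf
  set lo : Int := max d 0 with hlo
  set hi : Int := min f ((cs.length : Int) - 1) with hhi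
  rw [pvFoldl_eq_flatMap_enum cs d f ca1.toList ca2.toList]
  by_cases hcase : hi < lo
  · rw [if_pos hcase]
    have hall : ∀ p ∈ PySem.List.enumerate cs 0,
        ¬ (d ≤ p.1 ∧ p.1 ≤ f ∧ [p.2] = ca1.toList) := by
      intro p hp hc
      have hb := pvEnum_bounds hp
      omega
    rw [pvFlatMap_enum_false cs 0 _ _ hall]
    simp [hcs]
  · rw [if_neg hcase]
    have hle : lo ≤ hi := not_lt.mp hcase
    have hlo0 : 0 ≤ lo := le_max_right d 0
    have hhin : hi ≤ (cs.length : Int) - 1 := min_le_right _ _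
    set a : Nat := lo.toNat with ha
    set b : Nat := (hi + 1).toNat with hbdef
    set mlen : Nat := (hi + 1 - lo).toNat with hm
    have han : (a : Int) = lo := Int.toNat_of_nonneg hlo0
    have hbn : (b : Int) = hi + 1 := Int.toNat_of_nonneg (by omega)
    have hmn : (mlen : Int) = hi + 1 - lo := Int.toNat_of_nonneg (by omega)
    have hab : a + mlen = b := by omega
    have hbl : b ≤ cs.length := by
      have : ((b : Int)) ≤ (cs.length : Int) := by omega
      exact_mod_cast this
    have hsplit : cs = cs.take a ++ ((cs.drop a).take mlen ++ cs.drop b) := by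
      have h1 : (cs.drop a).take mlen ++ (cs.drop a).drop mlen = cs.drop a :=
        List.take_append_drop mlen (cs.drop a)
      have h2 : (cs.drop a).drop mlen = cs.drop b := by
        rw [List.drop_drop, hab]
      rw [← h2, h1, List.take_append_drop]
    have hlenpre : (cs.take a).length = a := by
      rw [List.length_take]
      omega
    have hlenmid : ((cs.drop a).take mlen).length = mlen := by
      rw [List.length_take, List.length_drop]
      omega
    conv_lhs => rw [hsplit]
    rw [PySem.List.enumerate_append, PySem.List.enumerate_append, List.flatMap_append,
        List.flatMap_append, hlenpre, hlenmid]
    have hpre : (PySem.List.enumerate (cs.take a) 0).flatMap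
        (fun p => if d ≤ p.1 ∧ p.1 ≤ f ∧ [p.2] = ca1.toList then ca2.toList else [p.2])
        = cs.take a := by
      refine pvFlatMap_enum_false _ _ _ _ (fun p hp hc => ?_)
      have hb2 := pvEnum_bounds hp
      rw [hlenpre] at hb2
      omega
    have hmid : (PySem.List.enumerate ((cs.drop a).take mlen) (0 + (a : Int))).flatMap
        (fun p => if d ≤ p.1 ∧ p.1 ≤ f ∧ [p.2] = ca1.toList then ca2.toList else [p.2])
        = ((cs.drop a).take mlen).flatMap
            (fun c => if [c] = ca1.toList then ca2.toList else [c]) := by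
      refine pvFlatMap_enum_true ((cs.drop a).take mlen) (0 + (a : Int)) (fun i => d ≤ i)
        (fun i => i ≤ f) (fun c => [c] = ca1.toList) (fun _ => ca2.toList) (fun p hp => ?_)
      have hb2 := pvEnum_bounds hp
      rw [hlenmid] at hb2
      omega
    have hsuf : (PySem.List.enumerate (cs.drop b) (0 + (a : Int) + (mlen : Int))).flatMap
        (fun p => if d ≤ p.1 ∧ p.1 ≤ f ∧ [p.2] = ca1.toList then ca2.toList else [p.2])
        = cs.drop b := by
      refine pvFlatMap_enum_false _ _ _ _ (fun p hp hc => ?_)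
      have hb2 := pvEnum_bounds hp
      rw [List.length_drop] at hb2
      have : ((cs.length - b : Nat) : Int) = (cs.length : Int) - b := by
        omega
      rw [this] at hb2
      omega
    rw [hpre, hmid, hsuf, List.append_assoc]
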